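/- GENERATED by tools/from_farm_form.py from prooffarm-gif/accepted/DGifGetPrefixChar/Proof.lean (a worked proof of the farm's unit `DGifGetPrefixChar`,
   accepted by the verdict) — do not edit. -/
import Gif.Spec.Units.DGifGetPrefixChar
import Gif.Spec.AllSegs
import Gif.Spec.Proved.DGifGetPrefixChar_Lemmas

open X86 X86.User Asan ProgX.Base ProgX.Base.Spec Gif.Spec

set_option maxRecDepth 4000
set_option maxHeartbeats 4000000

/-- `DGifGetPrefixChar` satisfies its contract (dgif_lib.c:1011-1022): four pushes and `sub rsp, 8`, the loop
`while (Code > ClearCode && i++ <= LZ_MAX_CODE)` (`u_loop` / `u_loop_back`; the counter `i` in `edx`, `Code` in `eax` as the ghost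
`x`) with the test `Code > LZ_MAX_CODE` BEFORE the checked load `Prefix[Code]`, three ways out (`Code ≤ ClearCode`, `i > 4095`,
`Code > 4095`: `eax = NO_SUCH_CODE`), pops, `ret`. The one check site is justified INSIDE `Prefix[4096]` (`prefixLive`):
`ClearCode ≥ 0` (the precondition) makes `Code > ClearCode` a lower bound, `Code ≤ 4095` is the test of l.1016. Nothing is
stored but the pushes and the check's return address. -/
theorem Gif.Spec.Proved.DGifGetPrefixChar_ok : Gif.Spec.DGifGetPrefixChar.Statement := by
  intro Lay hLay μ hμ u₀ hcode h_load4 H rest frames pv u ret he hpre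
  v_entry he
  obtain ⟨hhp, hlive, hrdi, hclear⟩ := hpre
  -- where pv is, as numbers (the load of `Prefix[Code]` is above the stack: the walker reads through the check's push)
  have hpin := Gif.Spec.DGifGetPrefixChar.gpc_pv_inside hhp hlive
  -- 0x105160 dgif_lib.c:1012 the prologue, `i = 0` … up to the loop head
  u_walk hcode [hμ.vendor] until [Gif.L.DGifGetPrefixChar.loop1]
    span [ProgX.Base.L.textLo, ProgX.Base.L.textHi] side (v_side)
  -- THE LOOP HEAD 0x105177 (dgif_lib.c:1015): what varies is generalised (the counter `i ≤ 4096` in edx, `Code` = any value `x`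
  -- in rax), the exact memory is replaced by what stays true
  obtain ⟨i, hi, hile⟩ : ∃ i : Nat, s_105172.reg .rdx = UInt64.ofNat i ∧ i ≤ 4096 := ⟨0, w_rdx, Nat.zero_le _⟩
  have hsame : Mem.SameExcept [⟨(u.reg .rsp).toNat - 64, (u.reg .rsp).toNat⟩] u.mem s_105172.mem := by
    u_same
  have hun : ShadowUntouched u.mem s_105172.mem := by v_untouched
  have hs1 : UInt64.ofNat (s_105172.mem.readLE (u.reg .rsp - 8) 8) = u.reg .r13 := by u_resolve
  have hs2 : UInt64.ofNat (s_105172.mem.readLE (u.reg .rsp - 16) 8) = u.reg .r12 := by u_resolve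
  have hs3 : UInt64.ofNat (s_105172.mem.readLE (u.reg .rsp - 24) 8) = u.reg .rbp := by u_resolve
  have hs4 : UInt64.ofNat (s_105172.mem.readLE (u.reg .rsp - 32) 8) = u.reg .rbx := by u_resolve
  have hs0 : UInt64.ofNat (s_105172.mem.readLE (u.reg .rsp) 8) = ret := by u_resolve
  have hdf : s_105172.flags .df = false := by
    rw [w_flags]
    simp only [X86.User.df_setStatus]
    exact he_df
  obtain ⟨x, hrax⟩ : ∃ x : Word, s_105172.reg .rax = x := ⟨_, rfl⟩
  have hrbp : s_105172.reg .rbp = u.reg .rdi := w_rbp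
  have hr12 : s_105172.reg .r12 = Word.ofBV (Word.part Width.w32 (u.reg Reg.rdx)) := w_r12
  have hrsp : s_105172.reg .rsp = u.reg .rsp - 40 := w_rsp
  replace w_kept := w_kept.mono_all (S' := [.rbx, .r12, .r13, .rsp, .rbp, .rdi, .rax, .rcx, .rdx]) (by rfl)
  clear w_mem w_flags w_rdx w_rax w_rbp w_r12 w_rsp
  u_loop [i, x] (fun v => 4096 - (v.reg .rdx).toNat)
  -- the three tests, up to the check of the body (where `Code` is known to be an index), or through an exit to the `ret`
  u_walk hcode [hμ.vendor] until [Gif.L.DGifGetPrefixChar.loop1, Gif.L.DGifGetPrefixChar.chk1]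
    span [ProgX.Base.L.textLo, ProgX.Base.L.textHi] side (v_side)
  · -- EXIT 0x10517a `jle` (l.1015 `Code ≤ ClearCode`), walked to the `ret`: nothing was stored
    refine ReachVia.done (Or.inl ?_)
    v_returned
    show ShadowUntouched u.mem _
    rw [w_mem]
    exact hun
  · -- EXIT 0x105185 `jg` (l.1015 `i > LZ_MAX_CODE`), walked to the `ret`: nothing was stored
    refine ReachVia.done (Or.inl ?_)
    v_returned
    show ShadowUntouched u.mem _
    rw [w_mem]
    exact hun
  · -- EXIT 0x10518c `jg` (l.1016-1017 `Code > LZ_MAX_CODE`: `return NO_SUCH_CODE`), walked to the `ret`: nothing was stored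
    refine ReachVia.done (Or.inl ?_)
    v_returned
    show ShadowUntouched u.mem _
    rw [w_mem]
    exact hun
  · -- 0x105198 (l.1019), before the check: the tests were true: `Code` sign-extends to the number `c`, `1 ≤ c ≤ 4095`
    obtain ⟨c, hc_lo, hc_hi, hsx⟩ := Gif.Spec.DGifGetPrefixChar.gpc_test_true _ _ hclear hbr_10517a hbr_10518c
    rw [hsx] at w_rax w_r13 w_rdi
    clear hbr_10517a hbr_10518c hsx
    -- the check, the load `Prefix[Code]`, `i++`, the back edge
    u_walk hcode [hμ.vendor] until [Gif.L.DGifGetPrefixChar.loop1]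
      span [ProgX.Base.L.textLo, ProgX.Base.L.textHi] side (v_side)
    · -- check_105198, l.1019 `Prefix[Code]`: inside `Prefix[4096]` (the index against THE ARRAY'S OWN count)
      have hun' : ShadowUntouched u.mem s_105198.mem := by v_untouched
      have hl := prefixLive hlive rest frames c (by omega)
      simp only [gfield] at hl
      have haddr := Gif.Spec.DGifGetPrefixChar.gpc_elem (u.reg .rdi) pv c hrdi hpin.2 hc_hi
      exact hl.accSmall hhp.inv.shadow hun' _ 4 (by decide) (by omega) (by omega)
    · -- THE BACK EDGE 0x1051a3 (l.1015): the counter is `i + 1 ≤ 4096`, `Code` is the loaded value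
      have hi95 := Gif.Spec.DGifGetPrefixChar.gpc_count_le i hile hbr_105185
      rw [Gif.Spec.DGifGetPrefixChar.gpc_succ i hi95] at w_rdx w_rbx
      obtain ⟨y, hy⟩ : ∃ y : Word, s_1051a3.reg .rax = y := ⟨_, w_rax⟩
      clear w_rax
      have w_rax := hy
      u_loop_back [i + 1, y]
      · -- the counter's bound
        omega
      · -- still no store to the shadow (the check's return address went to the stack)
        v_untouched
      · -- the direction flag: the check kept it (`w_df_105198`), `mov` wrote no flag
        rw [w_flags]
        assumption
      · -- the measure: `4096 − (i + 1) < 4096 − i`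
        rw [w_rdx]
        u_omega
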